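-- pv_equiv track=rewrite | github.com/RoryByrne1/Twin-Stick-Shooter | utility_functions.py | position_list
-- ===== SOURCE A (Python) =====
-- def position_list(first, last): # returns a list of positional strings within the range provided
--     if first <= last:
--         positions = [str(i) for i in range(first, last+1)]
--     else:
--         positions = [str(i) for i in range(first, last-1, -1)]
--     for i in range(len(positions)):
--         match positions[i][-1]:
--             case '1':
--                 if len(positions[i]) > 1:
--                     if positions[i][-2] != '1':
--                         positions[i] += 'st'
--                     else:
--                         positions[i] += 'th'
--                 else:
--                     positions[i] += 'st'
--             case '2':
--                 if len(positions[i]) > 1: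
--                     if positions[i][-2] != '1':
--                         positions[i] += 'nd'
--                     else:
--                         positions[i] += 'th'
--                 else:
--                     positions[i] += 'nd'
--             case '3':
--                 if len(positions[i]) > 1:
--                     if positions[i][-2] != '1':
--                         positions[i] += 'rd'
--                     else:
--                         positions[i] += 'th'
--                 else:
--                     positions[i] += 'rd'
--             case _:
--                 positions[i] += 'th'
--     return positions
-- ===== SOURCE B (Python) =====
-- # Precomputed 100-entry suffix cycle (digit pattern repeated, teens patched),
-- # built once; the list itself is produced ascending and reversed when needed.
-- _TABLE = (['th', 'st', 'nd', 'rd'] + ['th'] * 6) * 10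
-- for _i in (11, 12, 13):
--     _TABLE[_i] = 'th'
--
-- def position_list(first, last): # returns a list of positional strings within the range provided
--     lo, hi = (first, last) if first <= last else (last, first)
--     out = [str(n) + _TABLE[abs(n) % 100] for n in range(lo, hi + 1)]
--     return out if first <= last else out[::-1]
-- ===== Notes on version B (the rewrite author's own statement) =====
-- stated objective: alternative
-- what changed: B replaces A's per-element decimal-character inspection with a single precomputed 100-entry suffix table (the 10-suffix digit cycle repeated ten times with the teen slots 11-13 patched once), indexed by abs(n)%100, and builds the list ascending once, reversing it for a descending range instead of iterating with a negative step.
import Mathlib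
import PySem

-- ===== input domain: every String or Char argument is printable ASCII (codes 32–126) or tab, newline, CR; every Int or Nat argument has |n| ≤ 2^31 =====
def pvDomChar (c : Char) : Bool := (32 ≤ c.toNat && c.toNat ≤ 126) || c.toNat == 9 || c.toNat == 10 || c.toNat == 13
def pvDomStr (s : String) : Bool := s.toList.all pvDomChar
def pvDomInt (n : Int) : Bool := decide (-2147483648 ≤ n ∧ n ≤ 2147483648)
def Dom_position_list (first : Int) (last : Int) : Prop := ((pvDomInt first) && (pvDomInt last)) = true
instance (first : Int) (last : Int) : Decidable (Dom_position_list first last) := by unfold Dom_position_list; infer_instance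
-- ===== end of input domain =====

-- B looks each suffix up in a precomputed 100-entry table indexed by |n|%100 and builds the list ascending, reversing for descending ranges (alternative structure, not measured faster).


-- ===== PORT A =====
-- the body of A's for-loop: the suffix appended to positions[i], chosen by inspecting
-- positions[i][-1] and positions[i][-2] (strings handled as List Char via PySem.Chars; exact)
def pvSuffA (cs : List Char) : List Char :=
  match PySem.Chars.pyGet? cs (-1) with
  | some '1' =>
      if 1 < PySem.Chars.len cs then
        match PySem.Chars.pyGet? cs (-2) with
        | some '1' => ['t', 'h']
        | _ => ['s', 't']
      else ['s', 't']
  | some '2' =>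
      if 1 < PySem.Chars.len cs then
        match PySem.Chars.pyGet? cs (-2) with
        | some '1' => ['t', 'h']
        | _ => ['n', 'd']
      else ['n', 'd']
  | some '3' =>
      if 1 < PySem.Chars.len cs then
        match PySem.Chars.pyGet? cs (-2) with
        | some '1' => ['t', 'h']
        | _ => ['r', 'd']
      else ['r', 'd']
  | _ => ['t', 'h']

def position_list (first : Int) (last : Int) : List String :=
  let positions : List (List Char) :=
    if first ≤ last then (PySem.List.pyRange first (last + 1) 1).map PySem.Int.toChars
    else (PySem.List.pyRange first (last - 1) (-1)).map PySem.Int.toChars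
  (positions.map (fun cs => cs ++ pvSuffA cs)).map String.ofList

-- ===== PORT B =====
-- module-level _TABLE: the 10-suffix digit cycle repeated 10 times ('_T * 10'),
-- then the teen slots 11, 12, 13 overwritten with 'th' (list assignment = List.set)
def pvTable : List (List Char) :=
  let cycle := [['t','h'], ['s','t'], ['n','d'], ['r','d']] ++ List.replicate 6 ['t','h']
  ((((List.replicate 10 cycle).flatten).set 11 ['t','h']).set 12 ['t','h']).set 13 ['t','h']

def position_list_alt (first : Int) (last : Int) : List String :=
  let lo := if first ≤ last then first else last
  let hi := if first ≤ last then last else first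
  -- _TABLE[abs(n) % 100]: the index is always in range, so plain getD is exact here
  let out := (PySem.List.pyRange lo (hi + 1) 1).map
    (fun n => String.ofList (PySem.Int.toChars n ++ pvTable.getD (n.natAbs % 100) []))
  if first ≤ last then out else out.reverse

-- ===== PRECONDITION & SPEC =====
def Spec_position_list (first : Int) (last : Int) (out : List String) : Prop := out = position_list_alt first last
instance (first : Int) (last : Int) (out : List String) : Decidable (Spec_position_list first last out) := by unfold Spec_position_list; infer_instance

-- ===== CLAIM (what is proved, stated in full; the proofs are below) =====
def Claim_equal_position_list : Prop := ∀ (first : Int) (last : Int), Dom_position_list first last → Spec_position_list first last (position_list first last)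

-- ===== LEMMAS AND PROOFS =====

-- proof-only abstraction of the suffix rule as arithmetic on the magnitude
def pvOrdSuffix (m : Nat) : List Char :=
  if m % 100 == 11 || m % 100 == 12 || m % 100 == 13 then ['t', 'h']
  else
    let d := m % 10
    if d == 1 then ['s', 't']
    else if d == 2 then ['n', 'd']
    else if d == 3 then ['r', 'd']
    else ['t', 'h']

-- A's suffix choice only reads the last two characters
theorem pvSuffA_pair (front : List Char) (x y : Char) :
    pvSuffA (front ++ [x, y]) = pvSuffA [x, y] := by
  have h1 : PySem.Chars.pyGet? (front ++ [x, y]) (-1) = some y := by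
    simp [PySem.List.pyGet?, PySem.List.pyIdx?]
  have h2 : PySem.Chars.pyGet? (front ++ [x, y]) (-2) = some x := by
    simp [PySem.List.pyGet?, PySem.List.pyIdx?]
  have hl : (1 : Int) < PySem.Chars.len (front ++ [x, y]) := by
    simp [PySem.Chars.len]; omega
  simp only [pvSuffA, h1, h2, if_pos hl]
  rfl

theorem pvDigits_shape (m : Nat) (h : 10 ≤ m) :
    ∃ front, Nat.toDigits 10 m = front ++ [((m / 10) % 10).digitChar, (m % 10).digitChar] := by
  rw [Nat.toDigits_of_base_le (by norm_num) h]
  by_cases h2 : m / 10 < 10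
  · exact ⟨[], by rw [Nat.toDigits_of_lt_base h2, Nat.mod_eq_of_lt h2]; rfl⟩
  · refine ⟨Nat.toDigits 10 (m / 10 / 10), ?_⟩
    rw [Nat.toDigits_of_base_le (by norm_num) (le_of_not_gt h2)]
    simp

theorem pvKey_big (pre : List Char) (m : Nat)
    (hshape : ∃ front, pre = front ++ [((m / 10) % 10).digitChar, (m % 10).digitChar]) :
    pvSuffA pre = pvOrdSuffix m := by
  obtain ⟨front, hf⟩ := hshape
  rw [hf, pvSuffA_pair]
  have ha : (m / 10) % 10 < 10 := Nat.mod_lt _ (by norm_num)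
  have hb : m % 10 < 10 := Nat.mod_lt _ (by norm_num)
  have h100 : m % 100 = 10 * ((m / 10) % 10) + m % 10 := by omega
  simp only [pvOrdSuffix, h100]
  set a := (m / 10) % 10 with hA
  set b := m % 10 with hB
  clear_value a b
  interval_cases a <;> interval_cases b <;> decide

theorem pvKey_nonneg (m : Nat) : pvSuffA (Nat.toDigits 10 m) = pvOrdSuffix m := by
  by_cases h : m < 10
  · rw [Nat.toDigits_of_lt_base h]
    interval_cases m <;> decide
  · exact pvKey_big _ m (pvDigits_shape m (le_of_not_gt h))

theorem pvKey_neg (m : Nat) : pvSuffA ('-' :: Nat.toDigits 10 m) = pvOrdSuffix m := by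
  by_cases h : m < 10
  · rw [Nat.toDigits_of_lt_base h]
    interval_cases m <;> decide
  · obtain ⟨front, hf⟩ := pvDigits_shape m (le_of_not_gt h)
    exact pvKey_big _ m ⟨'-' :: front, by rw [hf]; rfl⟩

theorem pvKey (n : Int) : pvSuffA (PySem.Int.toChars n) = pvOrdSuffix n.natAbs := by
  unfold PySem.Int.toChars
  by_cases hn : n < 0
  · rw [if_pos hn]; exact pvKey_neg n.natAbs
  · rw [if_neg hn]
    have : n.toNat = n.natAbs := by omega
    rw [this]; exact pvKey_nonneg n.natAbs

-- the suffix rule only depends on m % 100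
theorem pvOrdSuffix_mod (m : Nat) : pvOrdSuffix m = pvOrdSuffix (m % 100) := by
  have h1 : m % 100 % 100 = m % 100 := Nat.mod_mod_of_dvd m dvd_rfl
  have h2 : m % 100 % 10 = m % 10 := Nat.mod_mod_of_dvd m (by norm_num)
  simp only [pvOrdSuffix, h1, h2]

-- the table agrees with the suffix rule on its 100 slots
theorem pvTable_slot (k : Nat) (hk : k < 100) : pvTable.getD k [] = pvOrdSuffix k := by
  interval_cases k <;> decide

theorem pvTable_lookup (m : Nat) : pvTable.getD (m % 100) [] = pvOrdSuffix m := by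
  rw [pvOrdSuffix_mod]
  exact pvTable_slot _ (Nat.mod_lt _ (by norm_num))

theorem pvElem (n : Int) :
    String.ofList (PySem.Int.toChars n ++ pvSuffA (PySem.Int.toChars n)) =
    String.ofList (PySem.Int.toChars n ++ pvTable.getD (n.natAbs % 100) []) := by
  rw [pvKey, pvTable_lookup]

-- ===== VERDICT (by name: the statement is the Claim_ definition above) =====
theorem position_list_spec : Claim_equal_position_list := by
  intro first last _
  unfold Spec_position_list position_list position_list_alt
  by_cases h : first ≤ last
  · simp only [h, if_true, List.map_map]
    exact List.map_congr_left (fun n _ => pvElem n)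
  · simp only [h, if_false, List.map_map]
    rw [PySem.List.pyRange_neg_one_eq_reverse]
    have hb : last - 1 + 1 = last := by omega
    rw [hb, ← List.map_reverse]
    exact List.map_congr_left (fun n _ => pvElem n)
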